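-- pv_equiv track=rewrite | github.com/HPereiraVitor/Lab1BatalhaNaval | vitor_henrique_da_silva_pereira.py | validar_qtt_pecas
-- ===== SOURCE A (Python) =====
-- def validar_qtt_pecas(posicoes: dict, torpedo: list) -> bool:
--     return (
--         len(torpedo) == 25 and len(posicoes) == 4 and len(posicoes['1']) == 5
--         and len(posicoes['2']) == 2 and len(posicoes['3']) == 10 and len(posicoes['4']) == 5
--         and all(len(value) == 4 for value in posicoes['1'].values())
--         and all(len(value) == 5 for value in posicoes['2'].values())
--         and all(len(value) == 1 for value in posicoes['3'].values())
--         and all(len(value) == 2 for value in posicoes['4'].values())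
--     )
-- ===== SOURCE B (Python) =====
-- def validar_qtt_pecas(posicoes: dict, torpedo: list) -> bool:
--     if len(torpedo) != 25 or len(posicoes) != 4:
--         return False
--     spec = {'1': (5, 4), '2': (2, 5), '3': (10, 1), '4': (5, 2)}
--     seen = set()
--     for key, sub in posicoes.items():
--         exp = spec.get(key)
--         if exp is None or len(sub) != exp[0]:
--             return False
--         if any(len(v) != exp[1] for v in sub.values()):
--             return False
--         seen.add(key)
--     return len(seen) == 4
-- ===== Notes on version B (the rewrite author's own statement) =====
-- stated objective: alternative
-- what changed: Instead of A's ten hard-coded keyed lookups and checks, B makes a single early-exit pass over posicoes.items(), validating each entry against a spec table via dict.get (so a missing key can never be indexed) while accumulating the set of matched keys, and finally requires all four keys to have been matched.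
import Mathlib
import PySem

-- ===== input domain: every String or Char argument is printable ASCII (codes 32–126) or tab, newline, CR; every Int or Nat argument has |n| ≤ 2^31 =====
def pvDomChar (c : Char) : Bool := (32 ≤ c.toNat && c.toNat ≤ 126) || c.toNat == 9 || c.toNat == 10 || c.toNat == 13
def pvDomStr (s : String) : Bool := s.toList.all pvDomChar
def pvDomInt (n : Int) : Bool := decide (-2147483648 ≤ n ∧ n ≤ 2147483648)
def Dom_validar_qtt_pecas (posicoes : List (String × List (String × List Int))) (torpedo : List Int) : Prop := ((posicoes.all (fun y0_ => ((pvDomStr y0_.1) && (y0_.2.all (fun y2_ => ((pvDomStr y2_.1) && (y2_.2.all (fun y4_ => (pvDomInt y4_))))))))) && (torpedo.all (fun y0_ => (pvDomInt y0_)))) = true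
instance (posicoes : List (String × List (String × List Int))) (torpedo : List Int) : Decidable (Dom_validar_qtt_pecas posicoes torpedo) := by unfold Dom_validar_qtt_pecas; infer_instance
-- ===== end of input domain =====

-- B replaces A's ten hard-coded keyed lookups by ONE early-exit pass over posicoes' items,
-- validating each entry against a spec table and collecting the set of matched keys
-- (objective: alternative; same cost).

-- ===== PORT A =====
-- Literal transliteration of A's boolean conjunction; posicoes['k'] is first-match lookup,
-- defaulted to [] only where Python raises KeyError (those inputs are excluded by Pre_).
def validar_qtt_pecas (posicoes : List (String × List (String × List Int))) (torpedo : List Int) : Bool :=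
  decide (torpedo.length = 25) && decide (posicoes.length = 4)
  && decide (((List.lookup "1" posicoes).getD []).length = 5)
  && decide (((List.lookup "2" posicoes).getD []).length = 2)
  && decide (((List.lookup "3" posicoes).getD []).length = 10)
  && decide (((List.lookup "4" posicoes).getD []).length = 5)
  && ((List.lookup "1" posicoes).getD []).all (fun v => decide (v.2.length = 4))
  && ((List.lookup "2" posicoes).getD []).all (fun v => decide (v.2.length = 5))
  && ((List.lookup "3" posicoes).getD []).all (fun v => decide (v.2.length = 1))
  && ((List.lookup "4" posicoes).getD []).all (fun v => decide (v.2.length = 2))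

-- ===== PORT B =====
-- the spec table: key ↦ (expected outer count, expected inner length)
def pvSpecTable : List (String × Nat × Nat) := [("1", (5, 4)), ("2", (2, 5)), ("3", (10, 1)), ("4", (5, 2))]

-- Source B's for-loop over posicoes.items() with the 'seen' set accumulator and early exit
def pvScan : List (String × List (String × List Int)) → PySem.Set String → Bool
  | [], seen => decide (seen.length = 4)
  | (k, sub) :: rest, seen =>
    match List.lookup k pvSpecTable with
    | none => false
    | some e =>
      if sub.length ≠ e.1 then false
      else if sub.any (fun v => decide (v.2.length ≠ e.2)) then false
      else pvScan rest (PySem.Set.add seen k)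

def validar_qtt_pecas_alt (posicoes : List (String × List (String × List Int))) (torpedo : List Int) : Bool :=
  if torpedo.length ≠ 25 ∨ posicoes.length ≠ 4 then false
  else pvScan posicoes PySem.Set.empty

-- ===== PRECONDITION & SPEC =====
-- the exact condition under which Python A raises KeyError: A's short-circuit chain reaches a
-- missing key among '1'..'4'
def pvChainRaises (posicoes : List (String × List (String × List Int))) : Bool :=
  match List.lookup "1" posicoes with
  | none => true
  | some s1 => decide (s1.length = 5) &&
    (match List.lookup "2" posicoes with
     | none => true
     | some s2 => decide (s2.length = 2) &&
       (match List.lookup "3" posicoes with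
        | none => true
        | some s3 => decide (s3.length = 10) && (List.lookup "4" posicoes).isNone))

-- Pre_ excludes exactly the inputs on which Python A raises KeyError (torpedo of length 25,
-- posicoes of size 4, and A's short-circuit chain reaching a missing key among '1'..'4');
-- it excludes nothing on which A returns.
def Pre_validar_qtt_pecas (posicoes : List (String × List (String × List Int))) (torpedo : List Int) : Prop :=
  ¬ (torpedo.length = 25 ∧ posicoes.length = 4 ∧ pvChainRaises posicoes = true)
instance (posicoes : List (String × List (String × List Int))) (torpedo : List Int) : Decidable (Pre_validar_qtt_pecas posicoes torpedo) := by unfold Pre_validar_qtt_pecas; infer_instance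

def pvWitness_validar_qtt_pecas : (List (String × List (String × List Int))) × List Int := ([], [])

def Spec_validar_qtt_pecas (posicoes : List (String × List (String × List Int))) (torpedo : List Int) (out : Bool) : Prop := out = validar_qtt_pecas_alt posicoes torpedo
instance (posicoes : List (String × List (String × List Int))) (torpedo : List Int) (out : Bool) : Decidable (Spec_validar_qtt_pecas posicoes torpedo out) := by unfold Spec_validar_qtt_pecas; infer_instance

-- ===== CLAIM (what is proved, stated in full; the proofs are below) =====
def Claim_equal_validar_qtt_pecas : Prop := ∀ (posicoes : List (String × List (String × List Int))) (torpedo : List Int), Dom_validar_qtt_pecas posicoes torpedo → Pre_validar_qtt_pecas posicoes torpedo → Spec_validar_qtt_pecas posicoes torpedo (validar_qtt_pecas posicoes torpedo)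

-- ===== LEMMAS AND PROOFS =====

-- one entry of posicoes passes Source B's per-entry checks
def pvEntryOK (p : String × List (String × List Int)) : Bool :=
  match List.lookup p.1 pvSpecTable with
  | none => false
  | some e => decide (p.2.length = e.1) && !(p.2.any (fun v => decide (v.2.length ≠ e.2)))

theorem pv_lookup_mem {α β : Type} [BEq α] [LawfulBEq α] {l : List (α × β)} {k : α} {v : β}
    (h : List.lookup k l = some v) : (k, v) ∈ l := by
  induction l with
  | nil => simp [List.lookup] at h
  | cons p rest ih =>
    obtain ⟨a, b⟩ := p
    by_cases hk : a = k
    · subst hk; simp [List.lookup] at h; simp [h]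
    · have hb : (k == a) = false := by simp [Ne.symm hk]
      simp only [List.lookup, hb] at h
      exact List.mem_cons_of_mem _ (ih h)

theorem pv_mem_lookup {α β : Type} [BEq α] [LawfulBEq α] {l : List (α × β)} {k : α}
    (h : k ∈ l.map Prod.fst) : ∃ v, List.lookup k l = some v ∧ (k, v) ∈ l := by
  induction l with
  | nil => simp at h
  | cons p rest ih =>
    obtain ⟨a, b⟩ := p
    by_cases hk : a = k
    · subst hk; exact ⟨b, by simp [List.lookup], by simp⟩
    · have hb : (k == a) = false := by simp [Ne.symm hk]
      simp [Ne.symm hk] at h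
      obtain ⟨v, hv, hm⟩ := ih (by simpa using h)
      exact ⟨v, by simp [List.lookup, hb, hv], List.mem_cons_of_mem _ hm⟩

theorem pv_lookup_nodup {α β : Type} [BEq α] [LawfulBEq α] {l : List (α × β)} {k : α} {v : β}
    (hnd : (l.map Prod.fst).Nodup) (h : (k, v) ∈ l) : List.lookup k l = some v := by
  induction l with
  | nil => simp at h
  | cons p rest ih =>
    obtain ⟨a, b⟩ := p
    rw [List.map_cons, List.nodup_cons] at hnd
    rcases List.mem_cons.mp h with heq | hm
    · injection heq with hk hv
      subst hk; subst hv
      simp [List.lookup]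
    · have hak : a ≠ k := by
        rintro rfl
        exact hnd.1 (List.mem_map.mpr ⟨(a, v), hm, rfl⟩)
      have hb : (k == a) = false := by simp [Ne.symm hak]
      simp only [List.lookup, hb]
      exact ih hnd.2 hm

-- a key admitted by the spec table is one of "1".."4"
theorem pv_spec_key {k : String} {e : Nat × Nat} (h : List.lookup k pvSpecTable = some e) :
    k ∈ (["1", "2", "3", "4"] : List String) := by
  by_cases h1 : k = "1"; · simp [h1]
  by_cases h2 : k = "2"; · simp [h2]
  by_cases h3 : k = "3"; · simp [h3]
  by_cases h4 : k = "4"; · simp [h4]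
  have b1 : (k == "1") = false := by simp [h1]
  have b2 : (k == "2") = false := by simp [h2]
  have b3 : (k == "3") = false := by simp [h3]
  have b4 : (k == "4") = false := by simp [h4]
  simp only [pvSpecTable, List.lookup, b1, b2, b3, b4] at h
  simp at h

-- Source B's loop = "every entry passes" plus the final distinct-keys count
theorem pvScan_eq (l : List (String × List (String × List Int))) :
    ∀ seen, pvScan l seen =
      (l.all pvEntryOK && decide ((l.foldl (fun s q => PySem.Set.add s q.1) seen).length = 4)) := by
  induction l with
  | nil => intro seen; simp [pvScan]
  | cons p rest ih =>
    intro seen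
    obtain ⟨k, sub⟩ := p
    rw [pvScan, List.all_cons]
    cases hlk : List.lookup k pvSpecTable with
    | none =>
      have hE : pvEntryOK (k, sub) = false := by simp only [pvEntryOK, hlk]
      rw [hE]
      dsimp only
      simp
    | some e =>
      have hE : pvEntryOK (k, sub)
          = (decide (sub.length = e.1) && !(sub.any (fun v => decide (v.2.length ≠ e.2)))) := by
        simp only [pvEntryOK, hlk]
      rw [hE]
      dsimp only
      by_cases hlen : sub.length = e.1
      · rw [if_neg (by simp [hlen])]
        cases hany : sub.any (fun v => decide (v.2.length ≠ e.2)) with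
        | true => simp
        | false =>
          simp only [Bool.false_eq_true, if_false, ih, List.foldl_cons, hlen, decide_true,
            Bool.not_false, Bool.true_and]
          rfl
      · rw [if_pos hlen]
        simp [hlen]

theorem pv_ports_agree (posicoes : List (String × List (String × List Int))) (torpedo : List Int) :
    validar_qtt_pecas posicoes torpedo = validar_qtt_pecas_alt posicoes torpedo := by
  unfold validar_qtt_pecas validar_qtt_pecas_alt
  by_cases ht : torpedo.length = 25
  case neg => simp [ht]
  by_cases hp : posicoes.length = 4
  case neg => simp [hp]
  simp only [ht, hp, ne_eq, not_true_eq_false, or_self, decide_true, Bool.true_and,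
    if_neg, not_false_eq_true]
  rw [pvScan_eq]
  have hfold : posicoes.foldl (fun s q => PySem.Set.add s q.1) PySem.Set.empty
      = PySem.Set.ofList (posicoes.map Prod.fst) := by
    rw [← PySem.Set.update_map_eq_foldl_add]
    exact PySem.Set.update_nil_left _
  rw [hfold]
  set keys := posicoes.map Prod.fst with hkeys
  have hklen : keys.length = 4 := by simp [hkeys, hp]
  have hend : (["1", "2", "3", "4"] : List String).Nodup := by decide
  have hspec1 : List.lookup "1" pvSpecTable = some (5, 4) := by decide
  have hspec2 : List.lookup "2" pvSpecTable = some (2, 5) := by decide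
  have hspec3 : List.lookup "3" pvSpecTable = some (10, 1) := by decide
  have hspec4 : List.lookup "4" pvSpecTable = some (5, 2) := by decide
  rw [Bool.eq_iff_iff]
  simp only [Bool.and_eq_true, decide_eq_true_eq, List.all_eq_true]
  constructor
  · rintro ⟨⟨⟨⟨⟨⟨⟨h1, h2⟩, h3⟩, h4⟩, i1⟩, i2⟩, i3⟩, i4⟩
    -- each lookup must be some (a [] default would fail the nonzero length check)
    cases e1 : List.lookup "1" posicoes with
    | none => rw [e1] at h1; simp at h1
    | some s1 =>
    cases e2 : List.lookup "2" posicoes with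
    | none => rw [e2] at h2; simp at h2
    | some s2 =>
    cases e3 : List.lookup "3" posicoes with
    | none => rw [e3] at h3; simp at h3
    | some s3 =>
    cases e4 : List.lookup "4" posicoes with
    | none => rw [e4] at h4; simp at h4
    | some s4 =>
    rw [e1] at h1 i1; rw [e2] at h2 i2; rw [e3] at h3 i3; rw [e4] at h4 i4
    simp only [Option.getD_some] at h1 h2 h3 h4 i1 i2 i3 i4
    have i1' : ∀ v ∈ s1, v.2.length = 4 := fun v hv => by simpa using i1 v hv
    have i2' : ∀ v ∈ s2, v.2.length = 5 := fun v hv => by simpa using i2 v hv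
    have i3' : ∀ v ∈ s3, v.2.length = 1 := fun v hv => by simpa using i3 v hv
    have i4' : ∀ v ∈ s4, v.2.length = 2 := fun v hv => by simpa using i4 v hv
    have hsub : (["1", "2", "3", "4"] : List String) ⊆ keys := by
      intro x hx
      simp only [List.mem_cons, List.not_mem_nil, or_false] at hx
      rcases hx with rfl | rfl | rfl | rfl
      · exact List.mem_map.mpr ⟨_, pv_lookup_mem e1, rfl⟩
      · exact List.mem_map.mpr ⟨_, pv_lookup_mem e2, rfl⟩
      · exact List.mem_map.mpr ⟨_, pv_lookup_mem e3, rfl⟩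
      · exact List.mem_map.mpr ⟨_, pv_lookup_mem e4, rfl⟩
    have hsp : List.Subperm ["1", "2", "3", "4"] keys := List.subperm_of_subset hend hsub
    have hperm : (["1", "2", "3", "4"] : List String).Perm keys :=
      hsp.perm_of_length_le (by simp [hklen])
    have hknd : keys.Nodup := hperm.nodup_iff.mp hend
    constructor
    · intro p hpmem
      obtain ⟨k, sub⟩ := p
      have hk : k ∈ keys := List.mem_map.mpr ⟨_, hpmem, rfl⟩
      have hk4 : k ∈ (["1", "2", "3", "4"] : List String) := (hperm.mem_iff).mpr hk
      have hlkp : List.lookup k posicoes = some sub := pv_lookup_nodup hknd hpmem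
      simp only [List.mem_cons, List.not_mem_nil, or_false] at hk4
      unfold pvEntryOK
      rcases hk4 with rfl | rfl | rfl | rfl
      · rw [e1] at hlkp; injection hlkp with hs; subst hs
        dsimp only
        rw [hspec1]
        simp [h1]
        exact fun a b hab => i1' (a, b) hab
      · rw [e2] at hlkp; injection hlkp with hs; subst hs
        dsimp only
        rw [hspec2]
        simp [h2]
        exact fun a b hab => i2' (a, b) hab
      · rw [e3] at hlkp; injection hlkp with hs; subst hs
        dsimp only
        rw [hspec3]
        simp [h3]
        exact fun a b hab => i3' (a, b) hab
      · rw [e4] at hlkp; injection hlkp with hs; subst hs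
        dsimp only
        rw [hspec4]
        simp [h4]
        exact fun a b hab => i4' (a, b) hab
    · -- the set of keys has exactly four elements
      have hsub' : (["1", "2", "3", "4"] : List String) ⊆ PySem.Set.ofList keys := by
        intro x hx; exact (PySem.Set.mem_ofList _ _).mpr (hsub hx)
      have hge : 4 ≤ (PySem.Set.ofList keys).length :=
        (List.subperm_of_subset hend hsub').length_le
      have hle : (PySem.Set.ofList keys).length ≤ keys.length := PySem.Set.length_ofList_le keys
      omega
  · rintro ⟨hall, hcard⟩
    -- every key of posicoes is a spec key
    have hkeysub : keys ⊆ (["1", "2", "3", "4"] : List String) := by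
      intro x hx
      obtain ⟨p, hpmem, rfl⟩ := List.mem_map.mp hx
      have hone := hall p hpmem
      unfold pvEntryOK at hone
      cases hlk : List.lookup p.1 pvSpecTable with
      | none => rw [hlk] at hone; simp at hone
      | some e => exact pv_spec_key hlk
    have hdsub : PySem.Set.ofList keys ⊆ (["1", "2", "3", "4"] : List String) := by
      intro x hx; exact hkeysub ((PySem.Set.mem_ofList _ _).mp hx)
    have hperm : (PySem.Set.ofList keys).Perm ["1", "2", "3", "4"] :=
      (List.subperm_of_subset (PySem.Set.nodup_ofList keys) hdsub).perm_of_length_le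
        (by simp [hcard])
    have hall4 : ∀ k ∈ (["1", "2", "3", "4"] : List String), k ∈ keys := by
      intro k hk
      exact (PySem.Set.mem_ofList _ _).mp ((hperm.mem_iff).mpr hk)
    -- fetch the entry each A-lookup finds and apply its pvEntryOK
    have hfetch : ∀ k : String, k ∈ keys → ∀ eo ei : Nat,
        List.lookup k pvSpecTable = some (eo, ei) →
        ∃ v, List.lookup k posicoes = some v ∧ v.length = eo ∧
          ∀ w ∈ v, (w.2.length = ei) := by
      intro k hk eo ei hspec
      obtain ⟨v, hv, hm⟩ := pv_mem_lookup hk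
      have hone := hall (k, v) hm
      unfold pvEntryOK at hone
      rw [hspec] at hone
      simp only [Bool.and_eq_true, decide_eq_true_eq, Bool.not_eq_eq_eq_not, Bool.not_true,
        List.any_eq_false, not_not] at hone
      exact ⟨v, hv, hone.1, fun w hw => hone.2 w hw⟩
    obtain ⟨v1, hv1, hl1, hi1⟩ := hfetch "1" (hall4 "1" (by simp)) 5 4 hspec1
    obtain ⟨v2, hv2, hl2, hi2⟩ := hfetch "2" (hall4 "2" (by simp)) 2 5 hspec2
    obtain ⟨v3, hv3, hl3, hi3⟩ := hfetch "3" (hall4 "3" (by simp)) 10 1 hspec3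
    obtain ⟨v4, hv4, hl4, hi4⟩ := hfetch "4" (hall4 "4" (by simp)) 5 2 hspec4
    rw [hv1, hv2, hv3, hv4]
    simp only [Option.getD_some]
    exact ⟨⟨⟨⟨⟨⟨⟨hl1, hl2⟩, hl3⟩, hl4⟩, fun v hv => by simp [hi1 v hv]⟩,
      fun v hv => by simp [hi2 v hv]⟩, fun v hv => by simp [hi3 v hv]⟩,
      fun v hv => by simp [hi4 v hv]⟩

-- ===== VERDICT (by name: the statement is the Claim_ definition above) =====
theorem validar_qtt_pecas_spec : Claim_equal_validar_qtt_pecas := by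
  intro posicoes torpedo _ _
  exact pv_ports_agree posicoes torpedo
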